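-- pv_equiv track=rewrite | github.com/matty-jones/MorphCT | code/obtainChromophores.py | obtainElectronicSpecies
-- ===== SOURCE A (Python) =====
-- def obtainElectronicSpecies(chromophoreCGSites, CGSiteTypes, CGToSpecies):
--     electronicallyActiveSites = []
--     currentChromophoreSpecies = None
--     for CGSiteID in chromophoreCGSites:
--         siteType = CGSiteTypes[CGSiteID]
--         siteSpecies = CGToSpecies[siteType]
--         if (siteSpecies != 'None'):
--             if (currentChromophoreSpecies is not None) and (currentChromophoreSpecies != siteSpecies):
--                 raise SystemError("PROBLEM - Multiple electronic species defined in the same chromophore. Please modify the chromophore generation code to fix this issue for your molecule!")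
--             else:
--                 currentChromophoreSpecies = siteSpecies
--                 electronicallyActiveSites.append(CGSiteID)
--     return electronicallyActiveSites, currentChromophoreSpecies
-- ===== SOURCE B (Python) =====
-- def obtainElectronicSpecies(chromophoreCGSites, CGSiteTypes, CGToSpecies):
--     activeSites = [s for s in chromophoreCGSites
--                    if CGToSpecies[CGSiteTypes[s]] != 'None']
--     species = []
--     for s in activeSites:
--         sp = CGToSpecies[CGSiteTypes[s]]
--         if sp not in species:
--             species.append(sp)
--     if len(species) > 1:
--         raise SystemError("PROBLEM - Multiple electronic species defined in the same chromophore. Please modify the chromophore generation code to fix this issue for your molecule!")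
--     return activeSites, (species[0] if species else None)
-- ===== Notes on version B (the rewrite author's own statement) =====
-- stated objective: simpler
-- what changed: Replaces A's interleaved single loop with running mutable state (currentChromophoreSpecies checked and updated per iteration) by two separate passes: a filter producing the active sites, then a collection of the distinct non-'None' species, raising only if more than one species was collected.
import Mathlib
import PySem

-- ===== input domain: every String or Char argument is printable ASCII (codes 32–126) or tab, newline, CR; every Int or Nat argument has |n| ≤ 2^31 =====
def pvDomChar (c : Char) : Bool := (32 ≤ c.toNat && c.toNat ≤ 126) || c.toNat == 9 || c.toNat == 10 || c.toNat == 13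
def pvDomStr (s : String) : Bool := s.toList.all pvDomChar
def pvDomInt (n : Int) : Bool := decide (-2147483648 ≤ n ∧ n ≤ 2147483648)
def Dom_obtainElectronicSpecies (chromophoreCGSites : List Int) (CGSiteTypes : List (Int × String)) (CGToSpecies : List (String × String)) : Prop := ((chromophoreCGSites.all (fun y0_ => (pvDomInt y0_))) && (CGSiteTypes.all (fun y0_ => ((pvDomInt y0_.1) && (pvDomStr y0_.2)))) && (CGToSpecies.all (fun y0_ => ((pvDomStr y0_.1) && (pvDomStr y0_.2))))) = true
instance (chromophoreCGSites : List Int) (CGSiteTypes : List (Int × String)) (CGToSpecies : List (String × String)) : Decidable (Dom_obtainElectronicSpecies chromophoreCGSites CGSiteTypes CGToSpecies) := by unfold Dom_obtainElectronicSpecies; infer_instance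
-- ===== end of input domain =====

-- B replaces A's single loop with running mutable species state by two separate passes
-- (filter the active sites, then collect the distinct non-'None' species); objective: simpler.
-- On inputs excluded by Pre_ both Pythons raise (KeyError / SystemError); nothing is claimed there.

-- shared lookup helper: CGToSpecies[CGSiteTypes[sid]] as an Option (none = KeyError)
def speciesOf (CGSiteTypes : List (Int × String)) (CGToSpecies : List (String × String)) (sid : Int) : Option String :=
  (PySem.Dict.get? (PySem.Dict.mk CGSiteTypes) sid).bind
    (fun t => PySem.Dict.get? (PySem.Dict.mk CGToSpecies) t)

-- ===== PORT A =====
-- A's loop, step for step; none = an exception (KeyError on a failed lookup, SystemError on a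
-- second species) — both are excluded by Pre_ below.
def obtainA_loop (CGSiteTypes : List (Int × String)) (CGToSpecies : List (String × String)) :
    List Int → List Int → Option String → Option (List Int × Option String)
  | [], acc, cur => some (acc, cur)
  | sid :: rest, acc, cur =>
    match speciesOf CGSiteTypes CGToSpecies sid with
    | none => none
    | some sp =>
      if sp ≠ "None" then
        if cur ≠ none ∧ cur ≠ some sp then none
        else obtainA_loop CGSiteTypes CGToSpecies rest (acc ++ [sid]) (some sp)
      else obtainA_loop CGSiteTypes CGToSpecies rest acc cur

def obtainElectronicSpecies (chromophoreCGSites : List Int) (CGSiteTypes : List (Int × String)) (CGToSpecies : List (String × String)) : List Int × Option String :=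
  (obtainA_loop CGSiteTypes CGToSpecies chromophoreCGSites [] none).getD ([], none)

-- ===== PORT B =====
-- lookup with a default; Pre_ guarantees the lookups succeed wherever it matters
def speciesD (CGSiteTypes : List (Int × String)) (CGToSpecies : List (String × String)) (sid : Int) : String :=
  (speciesOf CGSiteTypes CGToSpecies sid).getD ""

def obtainElectronicSpecies_alt (chromophoreCGSites : List Int) (CGSiteTypes : List (Int × String)) (CGToSpecies : List (String × String)) : List Int × Option String :=
  let activeSites := chromophoreCGSites.filter (fun s => speciesD CGSiteTypes CGToSpecies s ≠ "None")
  let species := PySem.Set.ofList (activeSites.map (speciesD CGSiteTypes CGToSpecies))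
  if species.length > 1 then ([], none)   -- the SystemError; excluded by Pre_
  else (activeSites, species.head?)

-- ===== PRECONDITION & SPEC =====
-- Pre_ excludes exactly the inputs on which the Python A raises: a KeyError (some listed site id
-- has no type, or its type has no species) or the SystemError (two distinct non-'None' species).
def Pre_obtainElectronicSpecies (chromophoreCGSites : List Int) (CGSiteTypes : List (Int × String)) (CGToSpecies : List (String × String)) : Prop :=
  (∀ sid ∈ chromophoreCGSites, (speciesOf CGSiteTypes CGToSpecies sid).isSome) ∧
  (∀ s₁ ∈ chromophoreCGSites, ∀ s₂ ∈ chromophoreCGSites,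
     speciesD CGSiteTypes CGToSpecies s₁ ≠ "None" → speciesD CGSiteTypes CGToSpecies s₂ ≠ "None" →
     speciesD CGSiteTypes CGToSpecies s₁ = speciesD CGSiteTypes CGToSpecies s₂)
instance (chromophoreCGSites : List Int) (CGSiteTypes : List (Int × String)) (CGToSpecies : List (String × String)) : Decidable (Pre_obtainElectronicSpecies chromophoreCGSites CGSiteTypes CGToSpecies) := by unfold Pre_obtainElectronicSpecies; infer_instance

def pvWitness_obtainElectronicSpecies : List Int × (List (Int × String)) × (List (String × String)) :=
  ([0, 1, 2], [(0, "A"), (1, "B"), (2, "C")], [("A", "P1"), ("B", "None"), ("C", "P1")])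

def Spec_obtainElectronicSpecies (chromophoreCGSites : List Int) (CGSiteTypes : List (Int × String)) (CGToSpecies : List (String × String)) (out : List Int × Option String) : Prop := out = obtainElectronicSpecies_alt chromophoreCGSites CGSiteTypes CGToSpecies
instance (chromophoreCGSites : List Int) (CGSiteTypes : List (Int × String)) (CGToSpecies : List (String × String)) (out : List Int × Option String) : Decidable (Spec_obtainElectronicSpecies chromophoreCGSites CGSiteTypes CGToSpecies out) := by unfold Spec_obtainElectronicSpecies; infer_instance

-- ===== CLAIM (what is proved, stated in full; the proofs are below) =====
def Claim_equal_obtainElectronicSpecies : Prop := ∀ (chromophoreCGSites : List Int) (CGSiteTypes : List (Int × String)) (CGToSpecies : List (String × String)), Dom_obtainElectronicSpecies chromophoreCGSites CGSiteTypes CGToSpecies → Pre_obtainElectronicSpecies chromophoreCGSites CGSiteTypes CGToSpecies → Spec_obtainElectronicSpecies chromophoreCGSites CGSiteTypes CGToSpecies (obtainElectronicSpecies chromophoreCGSites CGSiteTypes CGToSpecies)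

-- ===== LEMMAS AND PROOFS =====

-- Invariant for A's loop under the single-species hypothesis: it never hits the `none` (raise)
-- branch, accumulates exactly the filtered sites, and its final species is the last active one.
theorem obtainA_loop_inv (CGSiteTypes : List (Int × String)) (CGToSpecies : List (String × String))
    (l acc : List Int) (cur : Option String)
    (hsome : ∀ sid ∈ l, (speciesOf CGSiteTypes CGToSpecies sid).isSome)
    (hone : ∀ s₁ ∈ l, ∀ s₂ ∈ l,
       speciesD CGSiteTypes CGToSpecies s₁ ≠ "None" → speciesD CGSiteTypes CGToSpecies s₂ ≠ "None" →
       speciesD CGSiteTypes CGToSpecies s₁ = speciesD CGSiteTypes CGToSpecies s₂)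
    (hcur : ∀ s ∈ l, speciesD CGSiteTypes CGToSpecies s ≠ "None" →
       cur = none ∨ cur = some (speciesD CGSiteTypes CGToSpecies s)) :
    obtainA_loop CGSiteTypes CGToSpecies l acc cur =
      some (acc ++ l.filter (fun s => speciesD CGSiteTypes CGToSpecies s ≠ "None"),
            (l.filter (fun s => speciesD CGSiteTypes CGToSpecies s ≠ "None")).foldl
              (fun _ s => some (speciesD CGSiteTypes CGToSpecies s)) cur) := by
  induction l generalizing acc cur with
  | nil => simp [obtainA_loop]
  | cons sid rest ih =>
    have hs : (speciesOf CGSiteTypes CGToSpecies sid).isSome := hsome sid (by simp)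
    obtain ⟨sp, hsp⟩ := Option.isSome_iff_exists.mp hs
    have hD : speciesD CGSiteTypes CGToSpecies sid = sp := by simp [speciesD, hsp]
    by_cases hN : sp = "None"
    · -- inactive site: skipped
      have : obtainA_loop CGSiteTypes CGToSpecies (sid :: rest) acc cur =
          obtainA_loop CGSiteTypes CGToSpecies rest acc cur := by
        simp [obtainA_loop, hsp, hN]
      rw [this, ih acc cur (fun s hm => hsome s (by simp [hm]))
            (fun a ha b hb => hone a (by simp [ha]) b (by simp [hb]))
            (fun s hm => hcur s (by simp [hm]))]
      have hf : List.filter (fun s => decide (speciesD CGSiteTypes CGToSpecies s ≠ "None")) (sid :: rest)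
          = List.filter (fun s => decide (speciesD CGSiteTypes CGToSpecies s ≠ "None")) rest := by
        simp [List.filter, hD, hN]
      rw [hf]
    · -- active site
      have hne : speciesD CGSiteTypes CGToSpecies sid ≠ "None" := by rw [hD]; exact hN
      have hok : ¬ (cur ≠ none ∧ cur ≠ some sp) := by
        rcases hcur sid (by simp) hne with h | h
        · intro ⟨h1, _⟩; exact h1 h
        · intro ⟨_, h2⟩; exact h2 (by rw [h, hD])
      have hstep : obtainA_loop CGSiteTypes CGToSpecies (sid :: rest) acc cur =
          obtainA_loop CGSiteTypes CGToSpecies rest (acc ++ [sid]) (some sp) := by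
        simp only [obtainA_loop, hsp]
        rw [if_pos hN, if_neg hok]
      have hcur' : ∀ s ∈ rest, speciesD CGSiteTypes CGToSpecies s ≠ "None" →
          (some sp : Option String) = none ∨ (some sp : Option String) = some (speciesD CGSiteTypes CGToSpecies s) := by
        intro s hm hsne
        right
        have := hone sid (by simp) s (by simp [hm]) hne hsne
        rw [← this, hD]
      rw [hstep, ih (acc ++ [sid]) (some sp) (fun s hm => hsome s (by simp [hm]))
            (fun a ha b hb => hone a (by simp [ha]) b (by simp [hb])) hcur']
      have hf : List.filter (fun s => decide (speciesD CGSiteTypes CGToSpecies s ≠ "None")) (sid :: rest)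
          = sid :: List.filter (fun s => decide (speciesD CGSiteTypes CGToSpecies s ≠ "None")) rest := by
        simp [List.filter, hD, hN]
      rw [hf]
      simp [hD]


-- foldl that keeps the last element of a constant list
theorem foldl_const_last (σ : String) (xs : List String) (c : Option String)
    (hall : ∀ x ∈ xs, x = σ) :
    xs.foldl (fun _ s => some s) c = if xs.isEmpty then c else some σ := by
  induction xs generalizing c with
  | nil => simp
  | cons x rest ih =>
    have hx := hall x (List.mem_cons_self)
    subst hx
    rw [List.foldl_cons, ih (some x) (fun y hy => hall y (List.mem_cons_of_mem _ hy))]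
    cases rest with
    | nil => simp
    | cons y ys => simp

-- set(xs) of a constant list
theorem ofList_const (σ : String) (xs : List String) (hall : ∀ x ∈ xs, x = σ) :
    PySem.Set.ofList xs = if xs.isEmpty then [] else [σ] := by
  have key : ∀ (ys : List String), (∀ y ∈ ys, y = σ) →
      ys.foldl PySem.Set.add [σ] = [σ] := by
    intro ys
    induction ys with
    | nil => intro; rfl
    | cons y t iht =>
      intro hy
      have := hy y (List.mem_cons_self)
      subst this
      have hadd : PySem.Set.add [y] y = [y] := by
        simp [PySem.Set.add, PySem.Set.contains]
      rw [List.foldl_cons, hadd]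
      exact iht (fun z hz => hy z (List.mem_cons_of_mem _ hz))
  cases xs with
  | nil => rfl
  | cons x rest =>
    have hx := hall x (List.mem_cons_self)
    subst hx
    have h1 : PySem.Set.ofList (x :: rest) = rest.foldl PySem.Set.add [x] := by
      rw [PySem.Set.ofList_eq_foldl]; rfl
    rw [h1, key rest (fun y hy => hall y (List.mem_cons_of_mem _ hy))]
    simp

-- ===== VERDICT (by name: the statement is the Claim_ definition above) =====
theorem obtainElectronicSpecies_spec : Claim_equal_obtainElectronicSpecies := by
  intro l T S _ hpre
  obtain ⟨hsome, hone⟩ := hpre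
  unfold Spec_obtainElectronicSpecies obtainElectronicSpecies obtainElectronicSpecies_alt
  rw [obtainA_loop_inv T S l [] none hsome hone (fun _ _ _ => Or.inl rfl)]
  simp only [Option.getD_some, List.nil_append]
  cases hact : l.filter (fun s => decide (speciesD T S s ≠ "None")) with
  | nil => simp [PySem.Set.ofList]
  | cons a rest =>
    have hmem : ∀ s ∈ a :: rest, s ∈ l ∧ speciesD T S s ≠ "None" := by
      intro s hs
      have hsf : s ∈ l.filter (fun s => decide (speciesD T S s ≠ "None")) := by
        rw [hact]; exact hs
      rw [List.mem_filter] at hsf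
      exact ⟨hsf.1, by simpa using hsf.2⟩
    have hallσ : ∀ x ∈ (a :: rest).map (speciesD T S), x = speciesD T S a := by
      intro x hx
      rw [List.mem_map] at hx
      obtain ⟨s, hs, hxs⟩ := hx
      obtain ⟨hsl, hsne⟩ := hmem s hs
      obtain ⟨hal, hane⟩ := hmem a (List.mem_cons_self)
      rw [← hxs]
      exact hone s hsl a hal hsne hane
    rw [← List.foldl_map,
        foldl_const_last (speciesD T S a) _ none hallσ,
        ofList_const (speciesD T S a) _ hallσ]
    simp
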